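-- pv_equiv track=rewrite | github.com/mahfuzHasan2003/CodeForces-Problems-Solution | Desorting.py | count_min_shuffle
-- ===== SOURCE A (Python) =====
-- def count_min_shuffle(arr_list):
--     set_ans = arr_list[-1]
--     for i in range(1, len(arr_list)):
--         if arr_list[i] >= arr_list[i-1]:
--             set_ans = min(set_ans, arr_list[i]-arr_list[i-1])
--         else:
--             return 0
--     return set_ans//2 + 1
-- ===== SOURCE B (Python) =====
-- def count_min_shuffle(arr_list):
--     last = arr_list[-1]
--     if arr_list != sorted(arr_list):
--         return 0
--     return min([last] + [b - a for a, b in zip(arr_list, arr_list[1:])]) // 2 + 1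
-- ===== Notes on version B (the rewrite author's own statement) =====
-- stated objective: alternative
-- what changed: B detects a descent by comparing the list with its sorted copy (a sort-and-compare test instead of A's indexed scan with early return) and computes the minimum by one min() over zipped adjacent pairs seeded with the last element, instead of A's running-minimum accumulator.
import Mathlib
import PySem

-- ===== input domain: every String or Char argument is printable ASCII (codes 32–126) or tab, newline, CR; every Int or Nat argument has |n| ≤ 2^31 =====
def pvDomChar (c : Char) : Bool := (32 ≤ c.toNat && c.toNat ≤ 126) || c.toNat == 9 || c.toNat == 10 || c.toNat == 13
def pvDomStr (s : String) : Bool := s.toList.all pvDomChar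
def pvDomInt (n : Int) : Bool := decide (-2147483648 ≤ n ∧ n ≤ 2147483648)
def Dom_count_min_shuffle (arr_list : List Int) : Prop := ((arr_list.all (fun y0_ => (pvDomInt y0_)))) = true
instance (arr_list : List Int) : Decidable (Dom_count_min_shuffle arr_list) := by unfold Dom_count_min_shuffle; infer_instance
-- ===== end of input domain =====

-- B replaces A's indexed early-exit scan with a sort-and-compare monotonicity test plus one min over zipped adjacent pairs; alternative structure (B sorts, so it is not faster).


-- ===== PORT A =====
-- A's for-loop with its early `return 0`, as a structural recursion over the index i.
-- Indices i and i-1 are used only with 1 ≤ i < len, where Python indexing = getD.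
def pvALoop (arr : List Int) (i : Nat) (set_ans : Int) : Int :=
  if i < arr.length then
    if arr.getD (i - 1) 0 ≤ arr.getD i 0 then
      pvALoop arr (i + 1) (min set_ans (arr.getD i 0 - arr.getD (i - 1) 0))
    else 0
  else PySem.Int.floordiv set_ans 2 + 1
termination_by arr.length - i

def count_min_shuffle (arr_list : List Int) : Int :=
  match PySem.List.pyGet? arr_list (-1) with   -- the last element; none = IndexError, excluded by Pre_
  | some set_ans => pvALoop arr_list 1 set_ans
  | none => 0

-- ===== PORT B =====
-- sorted(arr_list) → PySem.List.sorted with the identity key; arr_list[1:] → tail (= slice_from_one);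
-- min([last] + diffs) → diffs.foldl min last.
def count_min_shuffle_alt (arr_list : List Int) : Int :=
  match PySem.List.pyGet? arr_list (-1) with   -- the last element; none = IndexError, excluded by Pre_
  | some last =>
    if arr_list ≠ PySem.List.sorted arr_list (fun x => x) false then 0
    else
      PySem.Int.floordiv
        (((arr_list.zip arr_list.tail).map (fun p => p.2 - p.1)).foldl min last) 2 + 1
  | none => 0

-- ===== PRECONDITION & SPEC =====
-- Pre_ excludes only the empty list, on which A raises IndexError when reading the last element.
def Pre_count_min_shuffle (arr_list : List Int) : Prop := arr_list ≠ []
instance (arr_list : List Int) : Decidable (Pre_count_min_shuffle arr_list) := by unfold Pre_count_min_shuffle; infer_instance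
def pvWitness_count_min_shuffle : List Int := [1, 3, 7]

def Spec_count_min_shuffle (arr_list : List Int) (out : Int) : Prop := out = count_min_shuffle_alt arr_list
instance (arr_list : List Int) (out : Int) : Decidable (Spec_count_min_shuffle arr_list out) := by unfold Spec_count_min_shuffle; infer_instance

-- ===== CLAIM (what is proved, stated in full; the proofs are below) =====
def Claim_equal_count_min_shuffle : Prop := ∀ (arr_list : List Int), Dom_count_min_shuffle arr_list → Pre_count_min_shuffle arr_list → Spec_count_min_shuffle arr_list (count_min_shuffle arr_list)

-- ===== LEMMAS AND PROOFS =====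

-- A's loop from index i, characterised over the remaining adjacent differences.
theorem pvALoop_eq (arr : List Int) :
    ∀ k i s, arr.length - i = k → 1 ≤ i →
    pvALoop arr i s =
      (if ((List.range' i (arr.length - i)).map
            (fun j => arr.getD j 0 - arr.getD (j - 1) 0)).any (fun d => d < 0) then 0
       else PySem.Int.floordiv
              (((List.range' i (arr.length - i)).map
                 (fun j => arr.getD j 0 - arr.getD (j - 1) 0)).foldl min s) 2 + 1) := by
  intro k
  induction k with
  | zero =>
    intro i s hk _
    have hle : arr.length ≤ i := by omega
    rw [pvALoop]
    simp [Nat.not_lt.mpr hle, hk]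
  | succ k ih =>
    intro i s hk hi
    have hlt : i < arr.length := by omega
    have hr : List.range' i (arr.length - i) = i :: List.range' (i + 1) (arr.length - (i + 1)) := by
      have : arr.length - i = (arr.length - (i + 1)) + 1 := by omega
      rw [this, List.range'_succ]
    rw [pvALoop]
    rw [if_pos hlt, hr]
    simp only [List.map_cons, List.any_cons, List.foldl_cons]
    by_cases h : arr.getD (i - 1) 0 ≤ arr.getD i 0
    · have hd : ¬ (arr.getD i 0 - arr.getD (i - 1) 0 < 0) := by omega
      rw [if_pos h, ih (i + 1) _ (by omega) (by omega),
          decide_eq_false hd, Bool.false_or]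
    · have hd : arr.getD i 0 - arr.getD (i - 1) 0 < 0 := by omega
      rw [if_neg h, if_pos (by rw [decide_eq_true hd, Bool.true_or])]

-- The two presentations of the adjacent-difference list coincide.
theorem diffs_zip_eq_range (arr : List Int) :
    (arr.zip arr.tail).map (fun p : Int × Int => p.2 - p.1) =
    (List.range' 1 (arr.length - 1)).map (fun j => arr.getD j 0 - arr.getD (j - 1) 0) := by
  apply List.ext_getElem
  · simp [List.length_zip, List.length_tail]
  · intro k h1 h2
    have hk : k + 1 < arr.length := by
      simp [List.length_zip, List.length_tail] at h1
      omega
    simp only [List.getElem_map, List.getElem_zip, List.getElem_tail, List.getElem_range']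
    rw [List.getD_eq_getElem _ 0 (by omega), List.getD_eq_getElem _ 0 (by omega)]
    have h1k : 1 + k = k + 1 := Nat.add_comm 1 k
    simp [h1k]

-- No negative adjacent difference ↔ the list equals its sorted copy.
theorem no_descent_iff_sorted (arr : List Int) :
    (((arr.zip arr.tail).map (fun p : Int × Int => p.2 - p.1)).any (fun d => d < 0) = false)
      ↔ arr = PySem.List.sorted arr (fun x => x) false := by
  have hchain : (((arr.zip arr.tail).map (fun p : Int × Int => p.2 - p.1)).any
      (fun d => d < 0) = false) ↔ List.IsChain (· ≤ ·) arr := by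
    induction arr with
    | nil => simp
    | cons a t ih =>
      cases t with
      | nil => simp
      | cons b u =>
        simp only [List.tail_cons, List.zip_cons_cons, List.map_cons, List.any_cons,
          Bool.or_eq_false_iff, List.isChain_cons_cons]
        constructor
        · rintro ⟨h1, h2⟩
          refine ⟨by simp at h1; omega, ih.mp h2⟩
        · rintro ⟨h1, h2⟩
          exact ⟨by simp; omega, ih.mpr h2⟩
  rw [hchain]
  constructor
  · intro hc
    exact (PySem.List.sorted_eq_self_of_pairwise arr (fun x => x)
      (by simpa using (List.isChain_iff_pairwise.mp hc))).symm
  · intro he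
    apply List.isChain_iff_pairwise.mpr
    have := PySem.List.sorted_pairwise arr (fun x => x) (κ := Int)
    rw [← he] at this
    simpa using this

-- ===== VERDICT (by name: the statement is the Claim_ definition above) =====
theorem count_min_shuffle_spec : Claim_equal_count_min_shuffle := by
  intro arr _ hpre
  unfold Spec_count_min_shuffle count_min_shuffle count_min_shuffle_alt
  cases hlast : PySem.List.pyGet? arr (-1) with
  | none => rfl
  | some last =>
    show pvALoop arr 1 last =
      (if arr ≠ PySem.List.sorted arr (fun x => x) false then 0
       else PySem.Int.floordiv
              (((arr.zip arr.tail).map (fun p => p.2 - p.1)).foldl min last) 2 + 1)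
    rw [pvALoop_eq arr (arr.length - 1) 1 last rfl (by omega), ← diffs_zip_eq_range]
    by_cases hs : arr = PySem.List.sorted arr (fun x => x) false
    · rw [if_neg (not_not_intro hs),
          if_neg (by rw [(no_descent_iff_sorted arr).mpr hs]; simp)]
    · have hany : (((arr.zip arr.tail).map (fun p : Int × Int => p.2 - p.1)).any
          (fun d => d < 0)) = true := by
        cases hb : (((arr.zip arr.tail).map (fun p : Int × Int => p.2 - p.1)).any
            (fun d => d < 0)) with
        | false => exact absurd ((no_descent_iff_sorted arr).mp hb) hs
        | true => rfl
      rw [if_pos hs, if_pos hany]
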